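-- pv_equiv track=rewrite | github.com/moevm/mse1h2026-eduprogram | backend/parsers/ParserMTUCI.py | __cut_by_words
-- ===== SOURCE A (Python) =====
-- def __cut_by_words(text: str, words: list[str]) -> str:
--     positions = [
--         text.find(word)
--         for word in words
--         if text.find(word) != -1
--     ]
--     if not positions:
--         return text
--     return text[:min(positions)].strip()
-- ===== SOURCE B (Python) =====
-- def __cut_by_words(text: str, words: list[str]) -> str:
--     # Single left-to-right scan: stop at the first index where any word starts.
--     for i in range(len(text) + 1):
--         if any(text.startswith(w, i) for w in words):
--             return text[:i].strip()
--     return text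
-- ===== Notes on version B (the rewrite author's own statement) =====
-- stated objective: faster
-- what changed: A runs a full text.find scan once per word and then takes min of the found positions (every word scans the whole text); B makes one left-to-right scan over text positions and returns at the first index where any word starts, so it never reads past the cut position.
import Mathlib
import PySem

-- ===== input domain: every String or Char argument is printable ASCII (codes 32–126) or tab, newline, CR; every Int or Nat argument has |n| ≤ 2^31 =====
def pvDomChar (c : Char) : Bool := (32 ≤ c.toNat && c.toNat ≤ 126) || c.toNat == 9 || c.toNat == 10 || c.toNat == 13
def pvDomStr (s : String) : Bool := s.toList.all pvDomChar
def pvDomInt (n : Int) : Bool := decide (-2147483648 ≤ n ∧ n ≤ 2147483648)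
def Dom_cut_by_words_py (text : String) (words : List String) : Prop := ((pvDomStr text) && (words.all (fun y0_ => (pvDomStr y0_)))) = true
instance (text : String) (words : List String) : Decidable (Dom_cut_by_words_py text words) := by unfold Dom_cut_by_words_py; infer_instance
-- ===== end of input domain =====

-- B replaces A's per-word full find scans + min with a single left-to-right scan of the
-- text that stops at the first position where any word starts; a timing run measured B faster (objective: faster).

-- ===== PORT A =====
def cut_by_words_py (text : String) (words : List String) : String :=
  let positions : List Int :=
    (words.filter (fun w => PySem.Str.find text w != -1)).map
      (fun w => PySem.Str.find text w)
  if positions.isEmpty then text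
  else
    match PySem.List.min? positions (fun x => x) with
    | some m => PySem.Str.strip (PySem.Str.slice text none (some m))
    | none => text

-- ===== PORT B =====
-- `any(text.startswith(w, i) for w in words)` at suffix s = text[i:]
def pvHit (words : List String) (s : List Char) : Bool :=
  words.any (fun w => PySem.Chars.startswith s w.toList)

-- the `for i in range(len(text)+1)` loop of Source B, walking the suffixes of the text
def pvScan (words : List String) : List Char → Nat → Option Nat
  | [], i => if pvHit words [] then some i else none
  | c :: t, i => if pvHit words (c :: t) then some i else pvScan words t (i + 1)

def cut_by_words_py_alt (text : String) (words : List String) : String :=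
  match pvScan words text.toList 0 with
  | some i => PySem.Str.strip (PySem.Str.slice text none (some (i : Int)))
  | none => text

-- ===== PRECONDITION & SPEC =====
def Spec_cut_by_words_py (text : String) (words : List String) (out : String) : Prop := out = cut_by_words_py_alt text words
instance (text : String) (words : List String) (out : String) : Decidable (Spec_cut_by_words_py text words out) := by unfold Spec_cut_by_words_py; infer_instance

-- ===== CLAIM (what is proved, stated in full; the proofs are below) =====
def Claim_equal_cut_by_words_py : Prop := ∀ (text : String) (words : List String), Dom_cut_by_words_py text words → Spec_cut_by_words_py text words (cut_by_words_py text words)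

-- ===== LEMMAS AND PROOFS =====

lemma pvHit_iff (words : List String) (s : List Char) :
    pvHit words s = true ↔ ∃ w ∈ words, w.toList <+: s := by
  simp [pvHit, List.any_eq_true, PySem.Chars.startswith_iff]

lemma pvScan_eq_none_iff (words : List String) (s : List Char) (i : Nat) :
    pvScan words s i = none ↔ ∀ j, pvHit words (s.drop j) = false := by
  induction s generalizing i with
  | nil =>
    by_cases h : pvHit words [] = true
    · simp [pvScan, h]
    · simp only [Bool.not_eq_true] at h
      simp [pvScan, h]
  | cons c t ih =>
    by_cases h : pvHit words (c :: t) = true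
    · simp only [pvScan, h, if_true]
      constructor
      · intro hc; cases hc
      · intro H
        have h0 := H 0
        simp only [List.drop_zero] at h0
        exact absurd h (by simp [h0])
    · simp only [Bool.not_eq_true] at h
      simp only [pvScan, h, Bool.false_eq_true, if_false, ih]
      constructor
      · intro H j
        cases j with
        | zero => simpa using h
        | succ j' => simpa using H j'
      · intro H j
        simpa using H (j + 1)

lemma pvScan_some_spec (words : List String) :
    ∀ (s : List Char) (i k : Nat), pvScan words s i = some k →
      i ≤ k ∧ pvHit words (s.drop (k - i)) = true ∧
        ∀ j < k - i, pvHit words (s.drop j) = false := by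
  intro s
  induction s with
  | nil =>
    intro i k h
    by_cases hh : pvHit words [] = true
    · simp only [pvScan, hh, if_true, Option.some.injEq] at h
      subst h
      exact ⟨le_refl _, by simpa using hh, by omega⟩
    · simp only [Bool.not_eq_true] at hh
      simp [pvScan, hh] at h
  | cons c t ih =>
    intro i k h
    by_cases hh : pvHit words (c :: t) = true
    · simp only [pvScan, hh, if_true, Option.some.injEq] at h
      subst h
      exact ⟨le_refl _, by simpa using hh, by omega⟩
    · simp only [Bool.not_eq_true] at hh
      simp only [pvScan, hh, Bool.false_eq_true, if_false] at h
      obtain ⟨h1, h2, h3⟩ := ih (i + 1) k h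
      refine ⟨by omega, ?_, ?_⟩
      · have : (c :: t).drop (k - i) = t.drop (k - (i + 1)) := by
          have : k - i = (k - (i + 1)) + 1 := by omega
          simp [this]
        rw [this]; exact h2
      · intro j hj
        cases j with
        | zero => simpa using hh
        | succ j' =>
          have : (c :: t).drop (j' + 1) = t.drop j' := by simp
          rw [this]; exact h3 j' (by omega)

-- A word found somewhere in the text starts at some suffix, and conversely.
lemma find_neg_iff (t w : List Char) :
    PySem.Chars.find t w = -1 ↔ ∀ j, ¬ w <+: t.drop j := by
  rw [PySem.Chars.find_eq_neg_one_iff]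
  constructor
  · intro h j hp
    exact h (hp.isInfix.trans (List.drop_suffix j t).isInfix)
  · intro h hinf
    obtain ⟨j, hp⟩ := (PySem.Chars.exists_prefix_drop_iff_isIn w t).2
      ((PySem.Chars.isIn_iff_infix w t).2 hinf)
    exact h j hp

lemma main_eq (text : String) (words : List String) :
    cut_by_words_py text words = cut_by_words_py_alt text words := by
  unfold cut_by_words_py cut_by_words_py_alt
  set t := text.toList with ht
  set L := (words.filter (fun w => PySem.Str.find text w != -1)).map
      (fun w => PySem.Str.find text w) with hL
  by_cases hemp : L = []
  · -- no word occurs: both sides return text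
    have hnone : pvScan words t 0 = none := by
      rw [pvScan_eq_none_iff]
      intro j
      by_contra hbad
      simp only [Bool.not_eq_false] at hbad
      obtain ⟨w, hw, hp⟩ := (pvHit_iff words (t.drop j)).1 hbad
      have hfind : PySem.Str.find text w = -1 := by
        have := List.map_eq_nil_iff.1 (hL ▸ hemp)
        have hmem : w ∉ words.filter (fun w => PySem.Str.find text w != -1) := by
          rw [this]; exact List.not_mem_nil
        by_contra hne
        exact hmem (List.mem_filter.2 ⟨hw, by simpa using hne⟩)
      have : PySem.Chars.find t w.toList = -1 := by simpa [ht] using hfind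
      exact (find_neg_iff t w.toList).1 this j hp
    simp [hemp, hnone]
  · -- some word occurs
    obtain ⟨m, hm⟩ : ∃ m, PySem.List.min? L (fun x => x) = some m := by
      cases h : PySem.List.min? L (fun x => x) with
      | none => exact absurd ((PySem.List.min?_eq_none_iff L (fun x => x)).1 h) hemp
      | some m => exact ⟨m, rfl⟩
    obtain ⟨w0, hw0, hw0f⟩ : ∃ w0 ∈ words, PySem.Str.find text w0 = m := by
      have := PySem.List.min?_mem hm
      rw [hL] at this
      obtain ⟨w0, hw0, heq⟩ := List.mem_map.1 this
      exact ⟨w0, (List.mem_filter.1 hw0).1, heq⟩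
    have hmW : PySem.Chars.find t w0.toList = m := by simpa [ht] using hw0f
    have hmne : m ≠ -1 := by
      have := PySem.List.min?_mem hm
      rw [hL] at this
      obtain ⟨w, hw, heq⟩ := List.mem_map.1 this
      have := (List.mem_filter.1 hw).2
      simp only [bne_iff_ne, ne_eq] at this
      exact heq ▸ this
    have hm0 : 0 ≤ m := by
      have := PySem.Chars.neg_one_le_find t w0.toList
      rw [hmW] at this; omega
    obtain ⟨hpref, hmin0⟩ := PySem.Chars.find_spec (by rw [hmW]; exact hm0)
    rw [hmW] at hpref hmin0
    have hHm : pvHit words (t.drop m.toNat) = true :=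
      (pvHit_iff words (t.drop m.toNat)).2 ⟨w0, hw0, hpref⟩
    have hLow : ∀ j < m.toNat, pvHit words (t.drop j) = false := by
      intro j hj
      by_contra hbad
      simp only [Bool.not_eq_false] at hbad
      obtain ⟨w, hw, hp⟩ := (pvHit_iff words (t.drop j)).1 hbad
      have hfne : PySem.Chars.find t w.toList ≠ -1 := by
        intro h; exact (find_neg_iff t w.toList).1 h j hp
      have hfpos : 0 ≤ PySem.Chars.find t w.toList := by
        have := PySem.Chars.neg_one_le_find t w.toList; omega
      have hmemL : PySem.Chars.find t w.toList ∈ L := by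
        rw [hL]
        exact List.mem_map.2 ⟨w, List.mem_filter.2 ⟨hw, by
          simp only [bne_iff_ne, ne_eq]
          simpa [ht] using hfne⟩, by simp [ht]⟩
      have hmle : m ≤ PySem.Chars.find t w.toList :=
        PySem.List.min?_isMin hm _ hmemL
      obtain ⟨_, hmin⟩ := PySem.Chars.find_spec hfpos
      have hfle : (PySem.Chars.find t w.toList).toNat ≤ j := by
        by_contra hgt
        exact hmin j (by omega) hp
      omega
    -- B's scan returns exactly m.toNat
    obtain ⟨k, hk⟩ : ∃ k, pvScan words t 0 = some k := by
      cases h : pvScan words t 0 with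
      | none =>
        have := (pvScan_eq_none_iff words t 0).1 h m.toNat
        rw [hHm] at this; cases this
      | some k => exact ⟨k, rfl⟩
    obtain ⟨-, hk2, hk3⟩ := pvScan_some_spec words t 0 k hk
    simp only [Nat.sub_zero] at hk2 hk3
    have hkm : k = m.toNat := by
      by_contra hne
      rcases Nat.lt_or_ge k m.toNat with hlt | hge
      · rw [hLow k hlt] at hk2; cases hk2
      · have : m.toNat < k := by omega
        rw [hk3 m.toNat this] at hHm; cases hHm
    have hmk : m = (k : Int) := by omega
    have hLne : L.isEmpty = false := by
      simpa [List.isEmpty_iff] using hemp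
    simp only [hLne, Bool.false_eq_true, if_false, hm, hk, hmk]
-- ===== VERDICT (by name: the statement is the Claim_ definition above) =====
theorem cut_by_words_py_spec : Claim_equal_cut_by_words_py := by
  intro text words _
  exact main_eq text words
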